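-- pv_equiv track=rewrite | github.com/hubo0520/m-agents | backend/app/workflow/state.py | append_analysis_context
-- ===== SOURCE A (Python) =====
-- from typing import TypedDict, Optional, List, Dict, Any
--
-- class GraphState(TypedDict, total=False):
--     """LangGraph graph state 定义 — 在节点间传递的共享状态"""
--     # 案件基础信息
--     case_id: int
--     merchant_id: int
--     workflow_run_id: int
--
--     # Agent 输入
--     agent_input: dict
--
--     # 各节点输出
--     case_context: dict
--     triage_output: dict
--     metrics: dict
--     forecast_output: dict
--     diagnosis_output: dict
--     evidence_output: dict
--     recommendation_output: dict
--     guard_output: dict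
--     summary_output: dict
--
--     # 审批信息
--     approval_task_ids: list
--     approval_results: dict
--
--     # 执行信息
--     execution_results: list
--     callback_results: dict
--
--     # 状态控制
--     current_status: str
--     error_message: str
--     should_pause: bool
--
--     # Agent 间累积式上下文传递
--     analysis_context: str
--
-- def append_analysis_context(
--     state: GraphState,
--     agent_name: str,
--     insight: str,
--     max_per_agent: int = 200,
--     max_total: int = 1500,
-- ) -> str:
--     """
--     向 analysis_context 追加 Agent 洞察。
--
--     Args:
--         state: 当前 GraphState
--         agent_name: Agent 名称标签
--         insight: 需要追加的洞察文本
--         max_per_agent: 每个 Agent 追加内容的字符上限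
--         max_total: analysis_context 总字符上限
--
--     Returns:
--         更新后的 analysis_context 字符串
--     """
--     # 截断单条洞察
--     if len(insight) > max_per_agent:
--         insight = insight[:max_per_agent]
--
--     entry = f"[{agent_name}] {insight}"
--     current = state.get("analysis_context", "") or ""
--
--     # 追加新条目
--     if current:
--         new_context = f"{current}\n{entry}"
--     else:
--         new_context = entry
--
--     # 如果超出总长度限制，截断最早的条目
--     while len(new_context) > max_total and "\n" in new_context:
--         # 移除最早的一行
--         new_context = new_context[new_context.index("\n") + 1:]
--
--     # 极端情况：单条就超限
--     if len(new_context) > max_total: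
--         new_context = new_context[:max_total]
--
--     return new_context
-- ===== SOURCE B (Python) =====
-- def append_analysis_context(
--     state,
--     agent_name,
--     insight,
--     max_per_agent=200,
--     max_total=1500,
-- ):
--     if len(insight) > max_per_agent:
--         insight = insight[:max_per_agent]
--     entry = f"[{agent_name}] {insight}"
--     current = state.get("analysis_context", "") or ""
--     combined = f"{current}\n{entry}" if current else entry
--     n = len(combined)
--     if n <= max_total:
--         return combined
--     # One forward pass: cut at the first newline whose suffix fits within
--     # max_total; remember the last newline seen as a fallback.
--     cut = last_nl = -1
--     for p, ch in enumerate(combined):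
--         if ch == "\n":
--             if n - p - 1 <= max_total:
--                 cut = p
--                 break
--             last_nl = p
--     if cut == -1:
--         cut = last_nl
--     result = combined[cut + 1:]
--     if len(result) > max_total:
--         result = result[:max_total]
--     return result
-- ===== Notes on version B (the rewrite author's own statement) =====
-- stated objective: alternative
-- what changed: A trims by repeatedly locating the first newline and re-slicing the whole string until it fits; B finds the cut point once with a single forward scan (first newline whose suffix fits, falling back to the last newline) and slices once.
import Mathlib
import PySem

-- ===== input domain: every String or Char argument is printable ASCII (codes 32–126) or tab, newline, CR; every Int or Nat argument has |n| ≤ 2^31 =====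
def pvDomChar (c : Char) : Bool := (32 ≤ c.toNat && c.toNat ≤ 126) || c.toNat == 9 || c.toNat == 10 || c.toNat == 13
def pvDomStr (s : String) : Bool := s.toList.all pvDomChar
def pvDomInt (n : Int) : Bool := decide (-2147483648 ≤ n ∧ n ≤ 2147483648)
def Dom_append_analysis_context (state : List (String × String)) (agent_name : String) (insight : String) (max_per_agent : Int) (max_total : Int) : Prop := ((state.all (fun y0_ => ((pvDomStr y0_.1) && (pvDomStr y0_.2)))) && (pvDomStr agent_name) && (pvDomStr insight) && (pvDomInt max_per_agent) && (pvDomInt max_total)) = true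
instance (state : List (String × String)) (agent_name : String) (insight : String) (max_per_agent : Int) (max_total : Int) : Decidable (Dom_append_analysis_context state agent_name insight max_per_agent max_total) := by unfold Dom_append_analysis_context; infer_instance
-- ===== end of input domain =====

-- B replaces A's repeated index-and-reslice while-loop by a single forward scan that finds
-- the cut newline once (objective: alternative decomposition, one pass over the characters).

-- ===== PORT A =====
-- The next five lemmas are cited by pvLoopA's decreasing_by (the while loop must shrink its string).
theorem pv_findGo_not_mem (s : List Char) (k : Nat) (h : '\n' ∉ s) :
    PySem.Chars.find.go ['\n'] s k = -1 := by
  induction s generalizing k with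
  | nil => simp [PySem.Chars.find.go]
  | cons c t ih =>
    simp only [List.mem_cons, not_or] at h
    simp [PySem.Chars.find.go, List.isPrefixOf, h.1, ih (k+1) h.2]

theorem pv_findGo_decomp (l r : List Char) (k : Nat) (h : '\n' ∉ l) :
    PySem.Chars.find.go ['\n'] (l ++ '\n' :: r) k = (k : Int) + l.length := by
  induction l generalizing k with
  | nil => simp [PySem.Chars.find.go, List.isPrefixOf]
  | cons c t ih =>
    simp only [List.mem_cons, not_or] at h
    simp only [List.cons_append, PySem.Chars.find.go, List.isPrefixOf]
    rw [if_neg (by simp [h.1]), ih (k+1) h.2]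
    simp only [List.length_cons]; push_cast; ring

theorem pv_find_decomp (l r : List Char) (h : '\n' ∉ l) :
    PySem.Chars.find (l ++ '\n' :: r) ['\n'] = (l.length : Int) := by
  simp [PySem.Chars.find, pv_findGo_decomp l r 0 h]

theorem pv_decomp (s : List Char) (h : '\n' ∈ s) :
    ∃ l r, s = l ++ '\n' :: r ∧ '\n' ∉ l := by
  induction s with
  | nil => simp at h
  | cons c t ih =>
    by_cases hc : c = '\n'
    · exact ⟨[], t, by simp [hc], by simp⟩
    · have hm : '\n' ∈ t := by
        rcases List.mem_cons.mp h with h1 | h1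
        · exact absurd h1.symm hc
        · exact h1
      rcases ih hm with ⟨l, r, hs, hl⟩
      refine ⟨c :: l, r, by simp [hs], ?_⟩
      simp only [List.mem_cons, not_or]
      exact ⟨fun h' => hc h'.symm, hl⟩

theorem pv_isIn_iff (s : List Char) : PySem.Chars.isIn ['\n'] s = true ↔ '\n' ∈ s := by
  constructor
  · intro h
    by_contra hm
    simp [PySem.Chars.isIn, PySem.Chars.find, pv_findGo_not_mem s 0 hm] at h
  · intro hm
    rcases pv_decomp s hm with ⟨l, r, hs, hl⟩
    subst hs
    simp [PySem.Chars.isIn, pv_find_decomp l r hl]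

theorem pv_slice_drop (l r : List Char) :
    PySem.Chars.slice (l ++ '\n' :: r) (some ((l.length : Int) + 1)) none = r := by
  have : ((l.length : Int) + 1) = ((l.length + 1 : Nat) : Int) := by push_cast; ring
  rw [PySem.Chars.slice, this, PySem.List.slice_from_natCast]
  have : l.length + 1 = (l ++ ['\n']).length := by simp
  rw [this, show l ++ '\n' :: r = (l ++ ['\n']) ++ r by simp, List.drop_left]

theorem pv_loop_step_len (s : List Char)
    (h : PySem.Chars.isIn ['\n'] s = true) :
    (PySem.Chars.slice s (some (PySem.Chars.find s ['\n'] + 1)) none).length < s.length := by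
  rcases pv_decomp s ((pv_isIn_iff s).mp h) with ⟨l, r, hs, hl⟩
  subst hs
  rw [pv_find_decomp l r hl, pv_slice_drop l r]
  simp; omega

-- the 'while len(new_context) > max_total and "\n" in new_context' loop of A
def pvLoopA (mt : Int) (s : List Char) : List Char :=
  if h : ((s.length : Int) > mt ∧ PySem.Chars.isIn ['\n'] s = true) then
    pvLoopA mt (PySem.Chars.slice s (some (PySem.Chars.find s ['\n'] + 1)) none)
  else s
termination_by s.length
decreasing_by exact pv_loop_step_len s h.2

-- the trimming part of A after new_context is built: the while loop, then the final [:max_total]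
def pvAfterA (mt : Int) (s : List Char) : List Char :=
  let t := pvLoopA mt s
  if (t.length : Int) > mt then PySem.Chars.slice t none (some mt) else t

def append_analysis_context (state : List (String × String)) (agent_name : String) (insight : String) (max_per_agent : Int) (max_total : Int) : String :=
  let insightL := insight.toList
  let insightL := if (insightL.length : Int) > max_per_agent then PySem.Chars.slice insightL none (some max_per_agent) else insightL
  let entry := ('[' :: agent_name.toList) ++ ']' :: ' ' :: insightL
  let current := (PySem.Dict.getD (PySem.Dict.mk state) "analysis_context" "").toList
  let current := if current = [] then [] else current   -- 'or ""'
  let newContext := if current ≠ [] then current ++ '\n' :: entry else entry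
  String.ofList (pvAfterA max_total newContext)

-- ===== PORT B =====
-- Source B's single forward scan: break at the first '\n' whose suffix fits, else fall back to the last '\n' seen
def pvScanB (mt n : Int) : List Char → Nat → Int → Int
  | [], _, lastNl => lastNl
  | c :: rest, p, lastNl =>
      if c = '\n' then
        if n - p - 1 ≤ mt then (p : Int) else pvScanB mt n rest (p + 1) (p : Int)
      else pvScanB mt n rest (p + 1) lastNl

-- the trimming part of Source B after combined is built
def pvAfterB (mt : Int) (s : List Char) : List Char :=
  if (s.length : Int) ≤ mt then s
  else
    let cut := pvScanB mt (s.length : Int) s 0 (-1)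
    let r := PySem.Chars.slice s (some (cut + 1)) none
    if (r.length : Int) > mt then PySem.Chars.slice r none (some mt) else r

def append_analysis_context_alt (state : List (String × String)) (agent_name : String) (insight : String) (max_per_agent : Int) (max_total : Int) : String :=
  let insightL := insight.toList
  let insightL := if (insightL.length : Int) > max_per_agent then PySem.Chars.slice insightL none (some max_per_agent) else insightL
  let entry := ('[' :: agent_name.toList) ++ ']' :: ' ' :: insightL
  let current := (PySem.Dict.getD (PySem.Dict.mk state) "analysis_context" "").toList
  let current := if current = [] then [] else current   -- 'or ""'
  let combined := if current ≠ [] then current ++ '\n' :: entry else entry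
  String.ofList (pvAfterB max_total combined)

-- ===== PRECONDITION & SPEC =====
def Spec_append_analysis_context (state : List (String × String)) (agent_name : String) (insight : String) (max_per_agent : Int) (max_total : Int) (out : String) : Prop := out = append_analysis_context_alt state agent_name insight max_per_agent max_total
instance (state : List (String × String)) (agent_name : String) (insight : String) (max_per_agent : Int) (max_total : Int) (out : String) : Decidable (Spec_append_analysis_context state agent_name insight max_per_agent max_total out) := by unfold Spec_append_analysis_context; infer_instance

-- ===== CLAIM (what is proved, stated in full; the proofs are below) =====
def Claim_equal_append_analysis_context : Prop := ∀ (state : List (String × String)) (agent_name : String) (insight : String) (max_per_agent : Int) (max_total : Int), Dom_append_analysis_context state agent_name insight max_per_agent max_total → Spec_append_analysis_context state agent_name insight max_per_agent max_total (append_analysis_context state agent_name insight max_per_agent max_total)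

-- ===== LEMMAS AND PROOFS =====

theorem pvLoopA_eq (mt : Int) (s : List Char) :
    pvLoopA mt s =
      if ((s.length : Int) > mt ∧ PySem.Chars.isIn ['\n'] s = true) then
        pvLoopA mt (PySem.Chars.slice s (some (PySem.Chars.find s ['\n'] + 1)) none)
      else s := by
  rw [pvLoopA]; simp [dite_eq_ite]

theorem pvScanB_not_mem (mt n : Int) (s : List Char) (p : Nat) (lastNl : Int) (h : '\n' ∉ s) :
    pvScanB mt n s p lastNl = lastNl := by
  induction s generalizing p lastNl with
  | nil => simp [pvScanB]
  | cons c t ih =>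
    simp only [List.mem_cons, not_or] at h
    simp [pvScanB, Ne.symm h.1, ih _ _ h.2]

theorem pvScanB_append_not_mem (mt n : Int) (l s : List Char) (p : Nat) (lastNl : Int) (h : '\n' ∉ l) :
    pvScanB mt n (l ++ s) p lastNl = pvScanB mt n s (p + l.length) lastNl := by
  induction l generalizing p lastNl with
  | nil => simp
  | cons c t ih =>
    simp only [List.mem_cons, not_or] at h
    simp only [List.cons_append, pvScanB, if_neg (Ne.symm h.1), ih _ _ h.2]
    congr 1
    simp only [List.length_cons]
    omega

theorem pvScanB_nonneg (mt n : Int) (s : List Char) (p : Nat) (lastNl : Int) (h : '\n' ∈ s) :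
    ∃ k : Nat, pvScanB mt n s p lastNl = (k : Int) := by
  induction s generalizing p lastNl with
  | nil => simp at h
  | cons c t ih =>
    by_cases hc : c = '\n'
    · subst hc
      by_cases hcond : n - p - 1 ≤ mt
      · exact ⟨p, by simp [pvScanB, hcond]⟩
      · by_cases hm : '\n' ∈ t
        · rcases ih (p+1) (p : Int) hm with ⟨k, hk⟩
          exact ⟨k, by simp [pvScanB, hcond, hk]⟩
        · exact ⟨p, by simp [pvScanB, hcond, pvScanB_not_mem mt n t (p+1) (p : Int) hm]⟩
    · have hm : '\n' ∈ t := by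
        rcases List.mem_cons.mp h with h1 | h1
        · exact absurd h1.symm hc
        · exact h1
      rcases ih (p+1) lastNl hm with ⟨k, hk⟩
      exact ⟨k, by simp [pvScanB, hc, hk]⟩

theorem pvScanB_offset (mt : Int) (s : List Char) (h : '\n' ∈ s) :
    ∀ (offs p : Nat) (n lastNl lastNl' : Int),
      pvScanB mt (n + (offs : Int)) s (p + offs) lastNl = pvScanB mt n s p lastNl' + (offs : Int) := by
  induction s with
  | nil => simp at h
  | cons c t ih =>
    intro offs p n lastNl lastNl'
    by_cases hc : c = '\n'
    · subst hc
      have hcond : (n + (offs : Int)) - (p + offs : Nat) - 1 ≤ mt ↔ n - p - 1 ≤ mt := by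
        push_cast; omega
      by_cases hcnd : n - p - 1 ≤ mt
      · simp [pvScanB, hcnd]
      · rw [pvScanB, pvScanB, if_pos rfl, if_pos rfl, if_neg (by rw [hcond]; exact hcnd), if_neg hcnd]
        by_cases hm : '\n' ∈ t
        · have := ih hm offs (p+1) n (((p + offs : Nat)) : Int) ((p : Int))
          rw [show p + offs + 1 = p + 1 + offs from by omega]
          exact this
        · rw [pvScanB_not_mem _ _ _ _ _ hm, pvScanB_not_mem _ _ _ _ _ hm]
          push_cast; ring
    · have hm : '\n' ∈ t := by
        rcases List.mem_cons.mp h with h1 | h1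
        · exact absurd h1.symm hc
        · exact h1
      rw [pvScanB, pvScanB, if_neg hc, if_neg hc]
      have := ih hm offs (p+1) n lastNl lastNl'
      rw [show p + offs + 1 = p + 1 + offs from by omega]
      exact this

theorem pv_slice_zero (s : List Char) : PySem.Chars.slice s (some ((-1 : Int) + 1)) none = s := by
  norm_num [PySem.Chars.slice]

theorem pvAfterA_eq (mt : Int) (s : List Char) :
    pvAfterA mt s =
      if ((pvLoopA mt s).length : Int) > mt then PySem.Chars.slice (pvLoopA mt s) none (some mt)
      else pvLoopA mt s := rfl

theorem pvAfterB_eq (mt : Int) (s : List Char) :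
    pvAfterB mt s =
      if (s.length : Int) ≤ mt then s
      else
        if ((PySem.Chars.slice s (some (pvScanB mt (s.length : Int) s 0 (-1) + 1)) none).length : Int) > mt then
          PySem.Chars.slice (PySem.Chars.slice s (some (pvScanB mt (s.length : Int) s 0 (-1) + 1)) none) none (some mt)
        else PySem.Chars.slice s (some (pvScanB mt (s.length : Int) s 0 (-1) + 1)) none := rfl

theorem pvLoopA_no_nl (mt : Int) (s : List Char) (hm : '\n' ∉ s) : pvLoopA mt s = s := by
  rw [pvLoopA_eq, if_neg]
  intro hg
  exact hm ((pv_isIn_iff s).mp hg.2)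

theorem pv_main_no_nl (mt : Int) (s : List Char) (hm : '\n' ∉ s) : pvAfterA mt s = pvAfterB mt s := by
  rw [pvAfterA_eq, pvAfterB_eq, pvLoopA_no_nl mt s hm, pvScanB_not_mem mt _ s 0 (-1) hm, pv_slice_zero]
  by_cases hle : (s.length : Int) ≤ mt
  · rw [if_neg (show ¬((s.length : Int) > mt) from by omega), if_pos hle]
  · rw [if_pos (show (s.length : Int) > mt from by omega), if_neg hle]

-- key: the two trimmers agree on every string and every cap
theorem pv_main (mt : Int) (s : List Char) : pvAfterA mt s = pvAfterB mt s := by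
  have H : ∀ (n : Nat) (s : List Char), s.length ≤ n → pvAfterA mt s = pvAfterB mt s := by
    intro n
    induction n with
    | zero =>
      intro s hs
      have hnil : s = [] := List.length_eq_zero_iff.mp (Nat.le_zero.mp hs)
      exact pv_main_no_nl mt s (by simp [hnil])
    | succ m ih =>
      intro s hs
      by_cases hm : '\n' ∈ s
      swap
      · exact pv_main_no_nl mt s hm
      rcases pv_decomp s hm with ⟨l, r, rfl, hl⟩
      have hlen : (l ++ '\n' :: r).length = l.length + 1 + r.length := by simp; omega
      by_cases hle : (((l ++ '\n' :: r).length : Int)) ≤ mt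
      · -- short enough: A's loop guard is false, B takes its first branch
        have hloop : pvLoopA mt (l ++ '\n' :: r) = l ++ '\n' :: r := by
          rw [pvLoopA_eq, if_neg (fun hg => absurd hg.1 (by omega))]
        rw [pvAfterA_eq, hloop, if_neg (show ¬(((l ++ '\n' :: r).length : Int) > mt) from by omega),
            pvAfterB_eq, if_pos hle]
      · -- A removes the first line, recurse
        have hA : pvAfterA mt (l ++ '\n' :: r) = pvAfterA mt r := by
          have hg : (((l ++ '\n' :: r).length : Int) > mt ∧ PySem.Chars.isIn ['\n'] (l ++ '\n' :: r) = true) :=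
            ⟨by omega, (pv_isIn_iff _).mpr hm⟩
          have hloop : pvLoopA mt (l ++ '\n' :: r) = pvLoopA mt r := by
            rw [pvLoopA_eq, if_pos hg, pv_find_decomp l r hl, pv_slice_drop l r]
          rw [pvAfterA_eq, pvAfterA_eq, hloop]
        rw [hA, ih r (by omega)]
        -- now: pvAfterB (l ++ '\n' :: r) = pvAfterB r
        rw [pvAfterB_eq, pvAfterB_eq]
        have hcut0 : pvScanB mt (((l ++ '\n' :: r).length : Int)) (l ++ '\n' :: r) 0 (-1)
            = pvScanB mt (((l ++ '\n' :: r).length : Int)) ('\n' :: r) l.length (-1) := by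
          rw [pvScanB_append_not_mem mt _ l ('\n' :: r) 0 (-1) hl, Nat.zero_add]
        have hstep : pvScanB mt (((l ++ '\n' :: r).length : Int)) ('\n' :: r) l.length (-1)
            = if ((l ++ '\n' :: r).length : Int) - l.length - 1 ≤ mt then (l.length : Int)
              else pvScanB mt (((l ++ '\n' :: r).length : Int)) r (l.length + 1) (l.length : Int) := by
          simp [pvScanB]
        by_cases hr : (r.length : Int) ≤ mt
        · -- the first newline's suffix already fits: B cuts right after l
          have hfit : ((l ++ '\n' :: r).length : Int) - l.length - 1 ≤ mt := by
            rw [hlen]; push_cast; omega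
          rw [if_neg hle, hcut0, hstep, if_pos hfit, pv_slice_drop l r,
              if_neg (show ¬((r.length : Int) > mt) from by omega), if_pos hr]
        · have hnfit : ¬(((l ++ '\n' :: r).length : Int) - l.length - 1 ≤ mt) := by
            rw [hlen]; push_cast; omega
          rw [if_neg hle, if_neg hr, hcut0, hstep, if_neg hnfit]
          by_cases hmr : '\n' ∈ r
          · -- cut positions shift by l.length + 1
            rcases pvScanB_nonneg mt (r.length : Int) r 0 (-1) hmr with ⟨k, hk⟩
            have hn : (((l ++ '\n' :: r).length : Int)) = (r.length : Int) + ((l.length + 1 : Nat) : Int) := by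
              rw [hlen]; push_cast; ring
            have hoff := pvScanB_offset mt r hmr (l.length + 1) 0 ((r.length : Int)) ((l.length : Int)) (-1)
            rw [Nat.zero_add] at hoff
            rw [hn, hoff, hk]
            have hsl : PySem.Chars.slice (l ++ '\n' :: r) (some ((k : Int) + ((l.length + 1 : Nat) : Int) + 1)) none
                = PySem.Chars.slice r (some ((k : Int) + 1)) none := by
              have h1 : ((k : Int) + ((l.length + 1 : Nat) : Int) + 1) = ((l.length + 1 + (k + 1) : Nat) : Int) := by
                push_cast; ring
              have h2 : ((k : Int) + 1) = ((k + 1 : Nat) : Int) := by push_cast; ring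
              rw [h1, h2, PySem.Chars.slice, PySem.Chars.slice,
                  PySem.List.slice_from_natCast, PySem.List.slice_from_natCast,
                  show l ++ '\n' :: r = (l ++ ['\n']) ++ r from by simp,
                  show l.length + 1 + (k + 1) = (l ++ ['\n']).length + (k + 1) from by simp,
                  ← List.drop_drop, List.drop_left]
            rw [hsl]
          · -- no further newline: both fall back to the whole last line r
            rw [pvScanB_not_mem mt _ r (l.length + 1) ((l.length : Int)) hmr,
                pvScanB_not_mem mt _ r 0 (-1) hmr,
                pv_slice_drop l r, pv_slice_zero]
  exact H s.length s le_rfl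

-- ===== VERDICT (by name: the statement is the Claim_ definition above) =====
theorem append_analysis_context_spec : Claim_equal_append_analysis_context := by
  intro state agent_name insight max_per_agent max_total _
  unfold Spec_append_analysis_context append_analysis_context append_analysis_context_alt
  simp only [pv_main]
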